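-- pv_equiv track=rewrite | github.com/techcsispit/learning-basics | Python/Basics/stringsep.py | wordsep
-- ===== SOURCE A (Python) =====
-- letters = ["a", "b", "c", "d", "e", "f",
--            "g", "h", "i", "j", "k", "l",
--            "m", "n", "o", "p", "q", "s",
--            "t", "u", "u", "v", "w", "x",
--            "y", "z"]
--
-- def wordsep(s):
--     word = ""
--     special = ""
--     for i in s:
--         if i.lower() in letters:
--             word+=i
--         else:
--             special += i
--     return word+special
-- ===== SOURCE B (Python) =====
-- letters = ["a", "b", "c", "d", "e", "f",
--            "g", "h", "i", "j", "k", "l",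
--            "m", "n", "o", "p", "q", "s",
--            "t", "u", "u", "v", "w", "x",
--            "y", "z"]
--
-- letter_set = set(letters)
--
-- def _is_letter(c):
--     return c.lower() in letter_set
--
-- def wordsep(s):
--     return "".join(filter(_is_letter, s)) + "".join(c for c in s if not _is_letter(c))
-- ===== Notes on version B (the rewrite author's own statement) =====
-- stated objective: idiomatic
-- what changed: Replaces the single loop with two string-building accumulators by two staged filter passes (letters, then non-letters) joined once, testing membership against a set built from the same letters list.
import Mathlib
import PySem

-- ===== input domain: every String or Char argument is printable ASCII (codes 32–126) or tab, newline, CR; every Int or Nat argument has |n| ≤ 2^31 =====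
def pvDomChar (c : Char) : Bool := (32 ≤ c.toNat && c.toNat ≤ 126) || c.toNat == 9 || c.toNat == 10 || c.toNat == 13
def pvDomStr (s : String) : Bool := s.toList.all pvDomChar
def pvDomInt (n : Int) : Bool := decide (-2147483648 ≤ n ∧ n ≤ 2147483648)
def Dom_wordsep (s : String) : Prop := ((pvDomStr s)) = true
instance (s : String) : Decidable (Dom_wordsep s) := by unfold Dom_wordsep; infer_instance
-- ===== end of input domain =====

-- B replaces A's single accumulator loop with two staged filter passes joined once, membership via a set; idiomatic decomposition, same behaviour.


-- module-level constant shared by both Pythons (note: 'r' missing, 'u' duplicated — kept verbatim)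
def letters : List String :=
  ["a", "b", "c", "d", "e", "f",
   "g", "h", "i", "j", "k", "l",
   "m", "n", "o", "p", "q", "s",
   "t", "u", "u", "v", "w", "x",
   "y", "z"]

-- ===== PORT A =====
def wordsep (s : String) : String :=
  let r := s.toList.foldl
    (fun (acc : List Char × List Char) i =>
      if letters.contains (PySem.Str.lower (String.ofList [i])) then (acc.1 ++ [i], acc.2)
      else (acc.1, acc.2 ++ [i]))
    ([], [])
  String.ofList (r.1 ++ r.2)

-- ===== PORT B =====
-- letter_set = set(letters)
def letterSet : PySem.Set String := PySem.Set.ofList letters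

-- _is_letter(c) = c.lower() in letter_set
def isLetterB (c : Char) : Bool := PySem.Set.contains letterSet (PySem.Str.lower (String.ofList [c]))

-- "".join(filter(_is_letter, s)) + "".join(c for c in s if not _is_letter(c))
def wordsep_alt (s : String) : String :=
  String.ofList (s.toList.filter isLetterB) ++ String.ofList (s.toList.filter (fun c => !isLetterB c))

-- ===== PRECONDITION & SPEC =====
def Spec_wordsep (s : String) (out : String) : Prop := out = wordsep_alt s
instance (s : String) (out : String) : Decidable (Spec_wordsep s out) := by unfold Spec_wordsep; infer_instance

-- ===== CLAIM (what is proved, stated in full; the proofs are below) =====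
def Claim_equal_wordsep : Prop := ∀ (s : String), Dom_wordsep s → Spec_wordsep s (wordsep s)

-- ===== LEMMAS AND PROOFS =====

-- A's loop: the pair of accumulators is (filter p, filter ¬p) of the prefix.
theorem wordsep_loop (p : Char → Bool) (xs : List Char) :
    ∀ w sp : List Char,
      xs.foldl (fun (acc : List Char × List Char) i =>
        if p i then (acc.1 ++ [i], acc.2) else (acc.1, acc.2 ++ [i])) (w, sp)
      = (w ++ xs.filter p, sp ++ xs.filter (fun i => !p i)) := by
  induction xs with
  | nil => intro w sp; simp
  | cons x xs ih =>
    intro w sp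
    by_cases h : p x = true <;> simp [List.filter, h, ih]

-- B's set membership agrees with A's list membership.
theorem isLetterB_eq (c : Char) :
    isLetterB c = letters.contains (PySem.Str.lower (String.ofList [c])) := by
  simp [isLetterB, letterSet, PySem.Set.contains, PySem.Set.mem_ofList]

-- ===== VERDICT (by name: the statement is the Claim_ definition above) =====
theorem wordsep_spec : Claim_equal_wordsep := by
  intro s _
  unfold Spec_wordsep wordsep wordsep_alt
  rw [wordsep_loop (fun i => letters.contains (PySem.Str.lower (String.ofList [i]))) s.toList [] []]
  rw [funext isLetterB_eq]
  simp [String.ofList_append]
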